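-- pv_equiv track=rewrite | github.com/wayneqmatthew/catbot | catbot/training.py | cat_near_edge
-- ===== SOURCE A (Python) =====
-- def cat_near_edge(new_cat_pos):
--     cat_x = int(new_cat_pos / 10)
--     cat_y = int(new_cat_pos % 10)
--
--     for i in range (4):
--         if i == 0:
--             x, y = 0,0
--
--         elif i == 1:
--             x, y = 0, 6
--
--         elif i == 2:
--             x, y = 6, 0
--
--         elif i == 3:
--             x, y = 6, 6
--
--         for j in range (x, x+2):
--             for k in range (y, y+2):
--                 if cat_x == j and cat_y == k:
--                     return True
--
--     return False
-- ===== SOURCE B (Python) =====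
-- def cat_near_edge(new_cat_pos):
--     cat_x = int(new_cat_pos / 10)
--     cat_y = int(new_cat_pos % 10)
--     return cat_x in (0, 1, 6, 7) and cat_y in (0, 1, 6, 7)
-- ===== Notes on version B (the rewrite author's own statement) =====
-- stated objective: simpler
-- what changed: Replaces the triple nested loop over four corner anchors and their 2x2 cells with a single closed-form membership test of each decoded coordinate in the four-element corner coordinate set, whose Cartesian product is exactly the accepted region.
import Mathlib
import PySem

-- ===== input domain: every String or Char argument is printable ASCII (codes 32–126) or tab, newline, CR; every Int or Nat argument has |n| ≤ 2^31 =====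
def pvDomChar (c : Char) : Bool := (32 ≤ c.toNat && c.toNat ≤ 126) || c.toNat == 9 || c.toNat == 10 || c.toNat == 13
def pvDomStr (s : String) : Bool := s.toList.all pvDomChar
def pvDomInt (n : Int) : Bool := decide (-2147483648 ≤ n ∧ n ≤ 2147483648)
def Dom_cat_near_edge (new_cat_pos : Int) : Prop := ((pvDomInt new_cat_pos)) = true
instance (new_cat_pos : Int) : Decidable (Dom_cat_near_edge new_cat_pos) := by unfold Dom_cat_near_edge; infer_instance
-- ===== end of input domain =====

-- B replaces A's nested loops over four corner anchors with one closed-form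
-- membership test on the decoded coordinates (objective: simpler).

-- ===== PORT A =====
-- int(new_cat_pos / 10) truncates the true quotient toward zero: for |n| ≤ 2^31 the
-- float division is close enough that int() of it equals Int.tdiv n 10 exactly.
def cat_near_edge (new_cat_pos : Int) : Bool :=
  let cat_x := Int.tdiv new_cat_pos 10
  let cat_y := PySem.Int.mod new_cat_pos 10
  -- the for-loops with early `return True` become `List.any` over the same ranges
  (PySem.List.pyRange 0 4 1).any (fun i =>
    let xy : Int × Int :=
      if i == 0 then (0, 0)
      else if i == 1 then (0, 6)
      else if i == 2 then (6, 0)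
      else (6, 6)
    (PySem.List.pyRange xy.1 (xy.1 + 2) 1).any (fun j =>
      (PySem.List.pyRange xy.2 (xy.2 + 2) 1).any (fun k =>
        cat_x == j && cat_y == k)))

-- ===== PORT B =====
def cat_near_edge_alt (new_cat_pos : Int) : Bool :=
  let cat_x := Int.tdiv new_cat_pos 10
  let cat_y := PySem.Int.mod new_cat_pos 10
  ([0, 1, 6, 7] : List Int).contains cat_x && ([0, 1, 6, 7] : List Int).contains cat_y

-- ===== PRECONDITION & SPEC =====
def Spec_cat_near_edge (new_cat_pos : Int) (out : Bool) : Prop := out = cat_near_edge_alt new_cat_pos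
instance (new_cat_pos : Int) (out : Bool) : Decidable (Spec_cat_near_edge new_cat_pos out) := by unfold Spec_cat_near_edge; infer_instance

-- ===== CLAIM (what is proved, stated in full; the proofs are below) =====
def Claim_equal_cat_near_edge : Prop := ∀ (new_cat_pos : Int), Dom_cat_near_edge new_cat_pos → Spec_cat_near_edge new_cat_pos (cat_near_edge new_cat_pos)

-- ===== LEMMAS AND PROOFS =====

-- both sides are the same function of the decoded pair (cat_x, cat_y)
theorem cat_near_edge_core (a b : Int) :
    (((PySem.List.pyRange 0 4 1).any (fun i =>
      let xy : Int × Int :=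
        if i == 0 then (0, 0)
        else if i == 1 then (0, 6)
        else if i == 2 then (6, 0)
        else (6, 6)
      (PySem.List.pyRange xy.1 (xy.1 + 2) 1).any (fun j =>
        (PySem.List.pyRange xy.2 (xy.2 + 2) 1).any (fun k =>
          a == j && b == k)))) : Bool)
      = (([0, 1, 6, 7] : List Int).contains a && ([0, 1, 6, 7] : List Int).contains b) := by
  have h4 : PySem.List.pyRange 0 4 1 = [0, 1, 2, 3] := by decide
  rw [h4]
  simp only [List.any_cons, List.any_nil]
  norm_num
  have h0 : PySem.List.pyRange (0 : Int) 2 1 = [0, 1] := by decide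
  have h6 : PySem.List.pyRange (6 : Int) 8 1 = [6, 7] := by decide
  simp only [h0, h6, List.any_cons, List.any_nil]
  rw [Bool.eq_iff_iff]
  simp only [Bool.or_false, Bool.or_eq_true, Bool.and_eq_true, beq_iff_eq, decide_eq_true_eq]
  omega

-- ===== VERDICT (by name: the statement is the Claim_ definition above) =====
theorem cat_near_edge_spec : Claim_equal_cat_near_edge := by
  intro n _
  unfold Spec_cat_near_edge cat_near_edge cat_near_edge_alt
  exact cat_near_edge_core _ _
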